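-- pv_equiv track=rewrite | github.com/kedar79/Autograd_Word2Vec | preprocessing_and_corpus_building.py | strip_bad_line
-- ===== SOURCE A (Python) =====
-- def strip_bad_line(line):
--     '''
--     Params : line - sentences from the file
--
--     This function stripes out all the lines containing extra details such as header information, footer information and
--     other unwanted information such as line stating( mailto: , Fax: , Telephone: etc)
--
--     '''
--     bad_line_contains=[':','>','|']
--     flag =1
--     #checks the line containing symbols such as ':','>','|'
--     for char in line:
--         if char in bad_line_contains:
--             flag=0
--     if(flag):
--         return line
-- ===== SOURCE B (Python) =====
-- def strip_bad_line(line):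
--     # Delete every forbidden character in one translate pass; the line is clean
--     # exactly when nothing was deleted, i.e. the length is unchanged.
--     cleaned = line.translate(str.maketrans('', '', ':>|'))
--     if len(cleaned) == len(line):
--         return line
-- ===== Notes on version B (the rewrite author's own statement) =====
-- stated objective: alternative
-- what changed: Instead of scanning characters with a flag, B deletes the forbidden characters with str.translate and returns the line iff the deletion left its length unchanged.
import Mathlib
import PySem

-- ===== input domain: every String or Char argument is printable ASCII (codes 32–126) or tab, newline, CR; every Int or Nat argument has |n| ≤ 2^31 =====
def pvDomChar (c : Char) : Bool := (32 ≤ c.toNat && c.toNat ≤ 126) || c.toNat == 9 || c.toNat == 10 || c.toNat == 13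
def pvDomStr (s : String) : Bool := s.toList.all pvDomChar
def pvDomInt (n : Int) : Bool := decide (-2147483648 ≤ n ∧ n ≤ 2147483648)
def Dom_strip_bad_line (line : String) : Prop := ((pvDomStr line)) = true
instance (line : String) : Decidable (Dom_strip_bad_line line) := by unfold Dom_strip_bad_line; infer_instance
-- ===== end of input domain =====

-- B deletes the forbidden characters (translate) and returns the line iff the length is unchanged; alternative decomposition, same cost.
-- ===== PORT A =====
def strip_bad_line (line : String) : Option String :=
  let bad_line_contains : List Char := [':', '>', '|']
  let flag : Int :=
    line.toList.foldl (fun flag char => if char ∈ bad_line_contains then 0 else flag) 1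
  if flag ≠ 0 then some line else none

-- ===== PORT B =====
-- str.translate with a deletion table for ':>|' removes exactly those characters;
-- ported exactly as a filter keeping every other character.
def strip_bad_line_alt (line : String) : Option String :=
  let cleaned : List Char := line.toList.filter (fun c => c ∉ ([':', '>', '|'] : List Char))
  if cleaned.length = line.toList.length then some line else none

-- ===== PRECONDITION & SPEC =====
def Spec_strip_bad_line (line : String) (out : Option String) : Prop := out = strip_bad_line_alt line
instance (line : String) (out : Option String) : Decidable (Spec_strip_bad_line line out) := by unfold Spec_strip_bad_line; infer_instance

-- ===== CLAIM =====
def Claim_equal_strip_bad_line : Prop := ∀ (line : String), Dom_strip_bad_line line → Spec_strip_bad_line line (strip_bad_line line)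

-- ===== LEMMAS AND PROOFS =====
theorem flag_foldl_eq (l : List Char) (flag : Int) :
    l.foldl (fun flag char => if char ∈ [':', '>', '|'] then (0:Int) else flag) flag
      = if l.any (fun c => c ∈ [':', '>', '|']) then 0 else flag := by
  induction l generalizing flag with
  | nil => simp
  | cons c cs ih =>
    simp only [List.foldl_cons, List.any_cons, ih]
    by_cases h : c ∈ [':', '>', '|'] <;> simp [h]

theorem filter_len_iff (l : List Char) :
    (l.filter (fun c => c ∉ ([':', '>', '|'] : List Char))).length = l.length
      ↔ l.any (fun c => c ∈ [':', '>', '|']) = false := by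
  rw [List.length_filter_eq_length_iff]
  simp

-- ===== VERDICT =====
theorem strip_bad_line_spec : Claim_equal_strip_bad_line := by
  intro line _
  unfold Spec_strip_bad_line strip_bad_line strip_bad_line_alt
  dsimp only
  rw [flag_foldl_eq]
  by_cases hb : line.toList.any (fun c => c ∈ [':', '>', '|']) = true
  · rw [if_pos hb, if_neg (by norm_num),
      if_neg (fun h => by rw [(filter_len_iff _).mp h] at hb; exact Bool.false_ne_true hb)]
  · have hb' := Bool.eq_false_iff.mpr hb
    rw [if_neg hb, if_pos (by norm_num), if_pos ((filter_len_iff _).mpr hb')]
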